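-- pv_equiv track=rewrite | github.com/hiagokinlevi/container-defense-stack | kubernetes/container_escape_detector.py | _is_sensitive_host_path
-- ===== SOURCE A (Python) =====
-- _SENSITIVE_HOST_PATHS = ["/", "/etc", "/proc", "/sys", "/var/log", "/boot", "/usr"]
--
-- def _is_sensitive_host_path(path: str) -> bool:
--     """Return True when *path* matches a sensitive host path prefix.
--
--     The root path "/" is treated as an exact match only — mounting the full
--     root filesystem is an escape risk, but an arbitrary path like "/data" is
--     not.  All other sensitive prefixes (/etc, /proc, /sys, /var/log, /boot,
--     /usr) also match their sub-paths via a leading-slash prefix check.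
--     """
--     # Normalise to avoid double-slash edge cases
--     norm = path.rstrip("/") or "/"
--     for sensitive in _SENSITIVE_HOST_PATHS:
--         if sensitive == "/":
--             # Only an exact mount of the root filesystem is flagged
--             if norm == "/":
--                 return True
--         else:
--             # Exact match (e.g. "/etc") or sub-path (e.g. "/etc/shadow")
--             if norm == sensitive or norm.startswith(sensitive + "/"):
--                 return True
--     return False
-- ===== SOURCE B (Python) =====
-- _SENSITIVE_SET = frozenset({"/etc", "/proc", "/sys", "/var/log", "/boot", "/usr"})
--
-- def _is_sensitive_host_path(path: str) -> bool:
--     # Same normalisation as A.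
--     norm = path.rstrip("/") or "/"
--     if norm == "/":
--         # Only an exact mount of the root filesystem is flagged.
--         return True
--     # One pass over norm's own characters: norm itself plus every ancestor
--     # prefix norm[:i] (i.e. the text before each '/'), checked against a set.
--     ancestors = [norm] + [norm[:i] for i, ch in enumerate(norm) if ch == "/"]
--     return any(a in _SENSITIVE_SET for a in ancestors)
-- ===== Notes on version B (the rewrite author's own statement) =====
-- stated objective: alternative
-- what changed: Instead of scanning the fixed prefix list with == / startswith, B walks the path's own '/' positions once, collects its ancestor prefixes and tests each for membership in a frozenset of the sensitive paths (root handled by one exact check).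
import Mathlib
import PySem

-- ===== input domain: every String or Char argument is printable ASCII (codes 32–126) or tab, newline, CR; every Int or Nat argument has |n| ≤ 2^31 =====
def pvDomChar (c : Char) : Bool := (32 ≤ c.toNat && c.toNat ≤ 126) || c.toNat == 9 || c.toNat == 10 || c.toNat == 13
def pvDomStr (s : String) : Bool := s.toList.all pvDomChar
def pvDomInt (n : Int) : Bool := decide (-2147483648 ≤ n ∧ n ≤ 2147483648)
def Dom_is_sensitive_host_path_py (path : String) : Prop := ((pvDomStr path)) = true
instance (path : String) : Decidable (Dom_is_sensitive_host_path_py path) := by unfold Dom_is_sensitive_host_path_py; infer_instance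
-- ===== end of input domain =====

-- B replaces A's scan over the fixed prefix list (==/startswith per entry) by one walk over the
-- path's own '/' positions collecting its ancestor prefixes, each looked up in a set (objective: alternative).

-- path.rstrip("/"): drop trailing '/' characters (hand port, exact for a one-character strip set)
def pvRstripSlash (cs : List Char) : List Char := (cs.reverse.dropWhile (· == '/')).reverse

-- ===== PORT A =====
def pvSensList : List (List Char) :=
  ["/".toList, "/etc".toList, "/proc".toList, "/sys".toList, "/var/log".toList, "/boot".toList, "/usr".toList]

-- the for-loop over _SENSITIVE_HOST_PATHS with early return
def pvALoop (norm : List Char) : List (List Char) → Bool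
  | [] => false
  | s :: rest =>
    if s = "/".toList then
      if norm = "/".toList then true else pvALoop norm rest
    else
      if norm = s ∨ PySem.Chars.startswith norm (s ++ "/".toList) then true
      else pvALoop norm rest

def is_sensitive_host_path_py (path : String) : Bool :=
  let r := pvRstripSlash path.toList
  let norm := if r = [] then "/".toList else r   -- path.rstrip("/") or "/"
  pvALoop norm pvSensList

-- ===== PORT B =====
def pvSensSet : PySem.Set (List Char) :=
  PySem.Set.ofList ["/etc".toList, "/proc".toList, "/sys".toList, "/var/log".toList, "/boot".toList, "/usr".toList]

def is_sensitive_host_path_py_alt (path : String) : Bool :=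
  let r := pvRstripSlash path.toList
  let norm := if r = [] then "/".toList else r   -- path.rstrip("/") or "/"
  if norm = "/".toList then true
  else
    let ancestors := norm ::
      (PySem.List.enumerate norm 0).filterMap
        (fun ic => if ic.2 = '/' then some (PySem.List.slice norm none (some ic.1)) else none)
    ancestors.any (fun a => pvSensSet.contains a)

-- ===== PRECONDITION & SPEC =====
def Spec_is_sensitive_host_path_py (path : String) (out : Bool) : Prop := out = is_sensitive_host_path_py_alt path
instance (path : String) (out : Bool) : Decidable (Spec_is_sensitive_host_path_py path out) := by unfold Spec_is_sensitive_host_path_py; infer_instance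

-- ===== CLAIM (what is proved, stated in full; the proofs are below) =====
def Claim_equal_is_sensitive_host_path_py : Prop := ∀ (path : String), Dom_is_sensitive_host_path_py path → Spec_is_sensitive_host_path_py path (is_sensitive_host_path_py path)

-- ===== LEMMAS AND PROOFS =====

-- (s ++ [c]) is a prefix of norm iff some position i of norm carries c with norm.take i = s
lemma pv_pref_iff (s norm : List Char) (c : Char) :
    (s ++ [c]) <+: norm ↔ ∃ i, i < norm.length ∧ norm[i]? = some c ∧ norm.take i = s := by
  constructor
  · rintro ⟨t, ht⟩
    refine ⟨s.length, ?_, ?_, ?_⟩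
    · rw [← ht]; simp
    · rw [← ht, List.getElem?_append_left (by simp)]; simp
    · rw [← ht, List.take_append_of_le_length (by simp)]; simp
  · rintro ⟨i, hi, hc, ht⟩
    have hlen : s.length = i := by
      have := congrArg List.length ht
      simp [Nat.min_eq_left (Nat.le_of_lt hi)] at this
      omega
    refine ⟨norm.drop (i + 1), ?_⟩
    have hsplit : norm = norm.take i ++ norm[i] :: norm.drop (i + 1) := by
      conv_lhs => rw [← List.take_append_drop i norm]
      congr 1
      exact List.drop_eq_getElem_cons hi
    have hci : norm[i] = c := by
      rw [List.getElem?_eq_getElem hi] at hc; exact Option.some.inj hc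
    rw [ht, hci] at hsplit
    simpa using hsplit.symm

-- membership in B's ancestor-tail list
lemma pv_mem_tail (norm a : List Char) :
    a ∈ (PySem.List.enumerate norm 0).filterMap
        (fun ic => if ic.2 = '/' then some (PySem.List.slice norm none (some ic.1)) else none)
      ↔ ∃ i, i < norm.length ∧ norm[i]? = some '/' ∧ norm.take i = a := by
  simp only [List.mem_filterMap, PySem.List.mem_enumerate_iff]
  constructor
  · rintro ⟨⟨j, c⟩, ⟨k, hk, hpc⟩, hif⟩
    have hj : j = (0 : Int) + k := (Prod.ext_iff.mp hpc).1
    have hc : c = norm[k] := (Prod.ext_iff.mp hpc).2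
    by_cases h : c = '/'
    · subst h
      simp only [if_true] at hif
      have ha := Option.some.inj hif
      rw [← ha, hj, PySem.List.slice_to norm (show (0:Int) ≤ 0 + (k:Int) by positivity)]
      exact ⟨k, hk, by simp [List.getElem?_eq_getElem hk, ← hc], by simp⟩
    · simp [h] at hif
  · rintro ⟨i, hi, hc, ht⟩
    have hgi : norm[i] = '/' := by
      rw [List.getElem?_eq_getElem hi] at hc; exact Option.some.inj hc
    refine ⟨((0 : Int) + (i : Int), '/'), ⟨i, hi, by simp [hgi]⟩, ?_⟩
    simp only [if_true]
    rw [PySem.List.slice_to norm (show (0:Int) ≤ 0 + (i:Int) by positivity)]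
    simpa using ht

lemma pvSensSet_eq : pvSensSet =
    ["/etc".toList, "/proc".toList, "/sys".toList, "/var/log".toList, "/boot".toList, "/usr".toList] := by
  decide

lemma pv_toList_root : "/".toList = ['/'] := rfl
lemma pv_toList_etc : "/etc".toList = ['/','e','t','c'] := rfl
lemma pv_toList_proc : "/proc".toList = ['/','p','r','o','c'] := rfl
lemma pv_toList_sys : "/sys".toList = ['/','s','y','s'] := rfl
lemma pv_toList_varlog : "/var/log".toList = ['/','v','a','r','/','l','o','g'] := rfl
lemma pv_toList_boot : "/boot".toList = ['/','b','o','o','t'] := rfl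
lemma pv_toList_usr : "/usr".toList = ['/','u','s','r'] := rfl

lemma pv_ite_or (p : Prop) [Decidable p] (b : Bool) : (if p then true else b) = (decide p || b) := by
  by_cases h : p <;> simp [h]

-- the core equality, for an arbitrary normalised path
lemma pv_main (norm : List Char) :
    pvALoop norm pvSensList =
      (if norm = "/".toList then true
       else
        (norm ::
          (PySem.List.enumerate norm 0).filterMap
            (fun ic => if ic.2 = '/' then some (PySem.List.slice norm none (some ic.1)) else none)).any
          (fun a => pvSensSet.contains a)) := by
  by_cases hroot : norm = "/".toList
  · simp [pvALoop, pvSensList, hroot]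
  · rw [if_neg hroot, Bool.eq_iff_iff]
    simp only [pvALoop, pvSensList, pv_toList_root, pv_toList_etc, pv_toList_proc, pv_toList_sys,
      pv_toList_varlog, pv_toList_boot, pv_toList_usr, pv_ite_or, List.cons.injEq,
      reduceCtorEq, and_false, if_false, if_true]
    rw [pv_toList_root] at hroot
    simp only [hroot, decide_false, Bool.false_or, Bool.or_false, List.any_cons, List.any_eq_true,
      Bool.or_eq_true, decide_eq_true_eq, PySem.Chars.startswith_iff, pvSensSet_eq,
      pv_toList_etc, pv_toList_proc, pv_toList_sys, pv_toList_varlog, pv_toList_boot, pv_toList_usr,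
      PySem.Set.contains_iff, List.mem_cons, List.not_mem_nil, or_false, pv_mem_tail, pv_pref_iff]
    constructor
    · rintro (⟨h | ⟨i, hi, hc, ht⟩⟩ | ⟨h | ⟨i, hi, hc, ht⟩⟩ | ⟨h | ⟨i, hi, hc, ht⟩⟩ |
        ⟨h | ⟨i, hi, hc, ht⟩⟩ | ⟨h | ⟨i, hi, hc, ht⟩⟩ | h | ⟨i, hi, hc, ht⟩) <;>
        first
          | exact Or.inl (by tauto)
          | exact Or.inr ⟨_, ⟨i, hi, hc, rfl⟩, by simp [ht]⟩
    · rintro (h | ⟨x, ⟨i, hi, hc, ht⟩, rfl | rfl | rfl | rfl | rfl | rfl⟩)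
      · tauto
      · exact Or.inl (Or.inr ⟨i, hi, hc, ht⟩)
      · exact Or.inr (Or.inl (Or.inr ⟨i, hi, hc, ht⟩))
      · exact Or.inr (Or.inr (Or.inl (Or.inr ⟨i, hi, hc, ht⟩)))
      · exact Or.inr (Or.inr (Or.inr (Or.inl (Or.inr ⟨i, hi, hc, ht⟩))))
      · exact Or.inr (Or.inr (Or.inr (Or.inr (Or.inl (Or.inr ⟨i, hi, hc, ht⟩)))))
      · exact Or.inr (Or.inr (Or.inr (Or.inr (Or.inr (Or.inr ⟨i, hi, hc, ht⟩)))))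

theorem is_sensitive_host_path_py_spec : Claim_equal_is_sensitive_host_path_py := by
  unfold Claim_equal_is_sensitive_host_path_py Spec_is_sensitive_host_path_py
  intro path _
  show pvALoop _ _ = _
  exact pv_main _
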